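-- pv_equiv track=rewrite | github.com/ElchaabiMohamed/InferCode_SVM | NC-5690-python-files/program_921.py | indiceInsertion
-- ===== SOURCE A (Python) =====
-- def indiceInsertion(sc,scores):
--   i=0
--   res=0
--   while i<len(scores):
--     if sc>=scores[i]:
--       res=i
--     i=i+1
--   return res
-- ===== SOURCE B (Python) =====
-- def indiceInsertion(sc, scores):
--     for i in range(len(scores) - 1, -1, -1):
--         if sc >= scores[i]:
--             return i
--     return 0
-- ===== Notes on version B (the rewrite author's own statement) =====
-- stated objective: alternative
-- what changed: Replaces A's forward full scan with a last-wins accumulator by a backward scan that returns the first hit immediately (early exit), with default 0 when the loop completes.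
import Mathlib
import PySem

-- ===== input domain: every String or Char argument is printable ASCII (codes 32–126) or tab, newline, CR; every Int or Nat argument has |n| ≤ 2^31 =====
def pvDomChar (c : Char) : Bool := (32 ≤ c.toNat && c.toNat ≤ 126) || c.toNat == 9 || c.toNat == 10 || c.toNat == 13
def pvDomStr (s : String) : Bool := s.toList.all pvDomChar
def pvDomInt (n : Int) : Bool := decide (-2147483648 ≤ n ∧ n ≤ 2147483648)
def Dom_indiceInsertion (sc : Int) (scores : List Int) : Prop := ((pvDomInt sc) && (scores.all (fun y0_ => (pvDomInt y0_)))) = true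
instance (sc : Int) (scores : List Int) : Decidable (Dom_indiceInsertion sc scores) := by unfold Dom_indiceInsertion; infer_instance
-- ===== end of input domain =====

-- B replaces A's forward last-wins accumulator over all indices by a backward scan that
-- returns the first matching index immediately (early exit); alternative decomposition, same cost class.


-- ===== PORT A =====
-- while i < len(scores): if sc >= scores[i]: res = i; i += 1  — fold of the loop body over the index range
def indiceInsertion (sc : Int) (scores : List Int) : Int :=
  (List.range scores.length).foldl (fun res i => if sc ≥ scores.getD i 0 then (i : Int) else res) 0

-- ===== PORT B =====
-- for i in range(len(scores)-1, -1, -1): if sc >= scores[i]: return i; return 0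
def altGo (sc : Int) (scores : List Int) : Nat → Int
  | 0 => 0
  | n + 1 => if sc ≥ scores.getD n 0 then (n : Int) else altGo sc scores n

def indiceInsertion_alt (sc : Int) (scores : List Int) : Int :=
  altGo sc scores scores.length

-- ===== PRECONDITION & SPEC =====
def Spec_indiceInsertion (sc : Int) (scores : List Int) (out : Int) : Prop := out = indiceInsertion_alt sc scores
instance (sc : Int) (scores : List Int) (out : Int) : Decidable (Spec_indiceInsertion sc scores out) := by unfold Spec_indiceInsertion; infer_instance

-- ===== CLAIM (what is proved, stated in full; the proofs are below) =====
def Claim_equal_indiceInsertion : Prop := ∀ (sc : Int) (scores : List Int), Dom_indiceInsertion sc scores → Spec_indiceInsertion sc scores (indiceInsertion sc scores)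

-- ===== LEMMAS AND PROOFS =====
-- The forward last-wins fold over range n equals the backward first-hit scan from n:
-- both satisfy F (n+1) = if sc ≥ scores[n] then n else F n, F 0 = 0.
theorem foldl_eq_altGo (sc : Int) (scores : List Int) (n : Nat) :
    (List.range n).foldl (fun res i => if sc ≥ scores.getD i 0 then (i : Int) else res) 0
      = altGo sc scores n := by
  induction n with
  | zero => rfl
  | succ k ih => rw [List.range_succ, List.foldl_append, ih]; simp [altGo]

-- ===== VERDICT (by name: the statement is the Claim_ definition above) =====
theorem indiceInsertion_spec : Claim_equal_indiceInsertion := by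
  intro sc scores _
  unfold Spec_indiceInsertion indiceInsertion indiceInsertion_alt
  exact foldl_eq_altGo sc scores scores.length
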